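-- pv_equiv track=rewrite | github.com/AndreMiguelAlves/Andre_Alves_exerciciostpsi0226 | Exercícios/Exercícios Sort/4.py | ordenar_minusculas
-- ===== SOURCE A (Python) =====
-- def contar_minusculas(palavra):
--
--     contador = 0
--     for caracter in palavra:
--
--         if 'a' <= caracter <= 'z':
--             contador += 1
--     return contador
--
-- def ordenar_minusculas(lista):
--     n = len(lista)
--
--     for i in range(n):
--         for j in range(0, n - i - 1):
--
--             contagem_atual = contar_minusculas(lista[j])
--             contagem_proxima = contar_minusculas(lista[j + 1])
--
--             if contagem_atual > contagem_proxima: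
--
--                 lista[j], lista[j + 1] = lista[j + 1], lista[j]
--
--     return lista
-- ===== SOURCE B (Python) =====
-- def contar_minusculas(palavra):
--     return sum(1 if 'a' <= c <= 'z' else 0 for c in palavra)
--
-- def ordenar_minusculas(lista):
--     lista[:] = sorted(lista, key=contar_minusculas)
--     return lista
-- ===== Notes on version B (the rewrite author's own statement) =====
-- stated objective: faster
-- what changed: Replaces the hand-written index-swapping bubble sort (which recomputes both lowercase counts on every comparison) with Python's builtin stable sorted() keyed by a one-pass lowercase count, written back in place via slice assignment.
import Mathlib
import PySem

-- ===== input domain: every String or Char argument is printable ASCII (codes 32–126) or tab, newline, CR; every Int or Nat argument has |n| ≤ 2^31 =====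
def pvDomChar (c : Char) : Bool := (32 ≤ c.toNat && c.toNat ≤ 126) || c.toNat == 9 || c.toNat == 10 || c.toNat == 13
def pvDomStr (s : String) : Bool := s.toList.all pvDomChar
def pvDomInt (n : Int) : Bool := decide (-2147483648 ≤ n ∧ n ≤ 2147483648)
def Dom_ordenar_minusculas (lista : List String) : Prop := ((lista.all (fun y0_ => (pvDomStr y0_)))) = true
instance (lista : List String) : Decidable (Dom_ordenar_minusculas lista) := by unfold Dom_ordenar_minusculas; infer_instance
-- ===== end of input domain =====

-- B replaces A's index-swapping bubble sort (counts recomputed per comparison) by the builtin stable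
-- sort keyed by a one-pass lowercase count; both mutate the argument list in place in Python — the
-- equivalence proved here is about the returned value.


-- ===== PORT A =====
def contar_minusculas (palavra : String) : Int :=
  palavra.toList.foldl (fun contador caracter =>
    if 'a' ≤ caracter ∧ caracter ≤ 'z' then contador + 1 else contador) 0

-- all indices j, j+1 are in range on every call (j + 1 ≤ n - i - 1 ≤ n - 1), so pyGetD/set are exact
def ordenar_minusculas (lista : List String) : List String :=
  let n : Int := lista.length
  (PySem.List.pyRange 0 n 1).foldl (fun l i =>
    (PySem.List.pyRange 0 (n - i - 1) 1).foldl (fun l j =>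
      let contagem_atual := contar_minusculas (PySem.List.pyGetD l j "")
      let contagem_proxima := contar_minusculas (PySem.List.pyGetD l (j + 1) "")
      if contagem_atual > contagem_proxima then
        (l.set j.toNat (PySem.List.pyGetD l (j + 1) "")).set (j + 1).toNat (PySem.List.pyGetD l j "")
      else l) l) lista

-- ===== PORT B =====
def contar_minusculas_alt (palavra : String) : Int :=
  (palavra.toList.map (fun c => if 'a' ≤ c ∧ c ≤ 'z' then (1 : Int) else 0)).sum

def ordenar_minusculas_alt (lista : List String) : List String :=
  PySem.List.sorted lista contar_minusculas_alt false

-- ===== PRECONDITION & SPEC =====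
def Spec_ordenar_minusculas (lista : List String) (out : List String) : Prop := out = ordenar_minusculas_alt lista
instance (lista : List String) (out : List String) : Decidable (Spec_ordenar_minusculas lista out) := by unfold Spec_ordenar_minusculas; infer_instance

-- ===== CLAIM (what is proved, stated in full; the proofs are below) =====
def Claim_equal_ordenar_minusculas : Prop := ∀ (lista : List String), Dom_ordenar_minusculas lista → Spec_ordenar_minusculas lista (ordenar_minusculas lista)

-- ===== LEMMAS AND PROOFS =====

-- abbreviation used only in the proofs
def cmKey (s : String) : Int := contar_minusculas s

-- the two counting helpers agree
theorem contar_alt_eq (s : String) : contar_minusculas_alt s = contar_minusculas s := by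
  unfold contar_minusculas_alt contar_minusculas
  suffices h : ∀ (cs : List Char) (a : Int),
      cs.foldl (fun contador c => if 'a' ≤ c ∧ c ≤ 'z' then contador + 1 else contador) a
        = a + (cs.map (fun c => if 'a' ≤ c ∧ c ≤ 'z' then (1 : Int) else 0)).sum by
    rw [h, zero_add]
  intro cs
  induction cs with
  | nil => intro a; simp
  | cons c cs ih =>
    intro a
    simp only [List.foldl_cons, List.map_cons, List.sum_cons, ih]
    split_ifs <;> ring

-- ---- the structural single compare-swap step (proof-side model of A's inner loop body) ----
def pstep (l : List String) (j : Nat) : List String :=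
  if cmKey (l.getD (j+1) "") < cmKey (l.getD j "") then
    (l.set j (l.getD (j+1) "")).set (j+1) (l.getD j "")
  else l

def ipass (l : List String) (m : Nat) : List String :=
  (List.range m).foldl pstep l

-- structural form of one (restricted) bubble pass
def spassTake : Nat → List String → List String
  | 0, l => l
  | m+1, x :: y :: t =>
      if cmKey y < cmKey x then y :: spassTake m (x :: t) else x :: spassTake m (y :: t)
  | _+1, [] => []
  | _+1, [x] => [x]

theorem pstep_cons_succ (z : String) (rest : List String) (j : Nat) :
    pstep (z :: rest) (j+1) = z :: pstep rest j := by
  simp only [pstep, List.getD_cons_succ, List.set_cons_succ]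
  split_ifs <;> rfl

theorem foldl_pstep_shift (js : List Nat) (z : String) (rest : List String) :
    (js.map (· + 1)).foldl pstep (z :: rest) = z :: js.foldl pstep rest := by
  induction js generalizing rest with
  | nil => rfl
  | cons j js ih =>
    simp only [List.map_cons, List.foldl_cons, pstep_cons_succ]
    exact ih (pstep rest j)

theorem ipass_eq_spassTake : ∀ (m : Nat) (l : List String), m < l.length →
    ipass l m = spassTake m l := by
  intro m
  induction m with
  | zero => intro l _; rfl
  | succ m ih =>
    intro l hm
    match l, hm with
    | x :: y :: t, hm =>
      have hstep0 : pstep (x :: y :: t) 0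
          = if cmKey y < cmKey x then y :: x :: t else x :: y :: t := by
        simp only [pstep, List.getD_cons_succ, List.getD_cons_zero]
        split_ifs <;> rfl
      have hrange : List.range (m+1) = 0 :: (List.range m).map (· + 1) := by
        rw [List.range_succ_eq_map]
      unfold ipass
      rw [hrange, List.foldl_cons, hstep0]
      have ht : m < t.length + 1 := by
        simpa using Nat.lt_of_succ_lt_succ hm
      by_cases hc : cmKey y < cmKey x
      · rw [if_pos hc, foldl_pstep_shift]
        show y :: ipass (x :: t) m = spassTake (m+1) (x :: y :: t)
        rw [ih (x :: t) (by simpa using ht)]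
        simp only [spassTake, if_pos hc]
      · rw [if_neg hc, foldl_pstep_shift]
        show x :: ipass (y :: t) m = spassTake (m+1) (x :: y :: t)
        rw [ih (y :: t) (by simpa using ht)]
        simp only [spassTake, if_neg hc]

theorem spassTake_length (m : Nat) (l : List String) : (spassTake m l).length = l.length := by
  induction m generalizing l with
  | zero => rfl
  | succ m ih =>
    match l with
    | [] => rfl
    | [x] => rfl
    | x :: y :: t =>
      simp only [spassTake]
      split_ifs <;> simp [ih]

theorem spassTake_perm (m : Nat) (l : List String) : (spassTake m l).Perm l := by
  induction m generalizing l with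
  | zero => exact List.Perm.refl l
  | succ m ih =>
    match l with
    | [] => exact List.Perm.refl []
    | [x] => exact List.Perm.refl [x]
    | x :: y :: t =>
      simp only [spassTake]
      split_ifs with hc
      · exact ((ih (x :: t)).cons y).trans (List.Perm.swap x y t)
      · exact (ih (y :: t)).cons x

theorem spassTake_drop (m : Nat) (l : List String) :
    (spassTake m l).drop (m+1) = l.drop (m+1) := by
  induction m generalizing l with
  | zero => rfl
  | succ m ih =>
    match l with
    | [] => simp [spassTake]
    | [x] => simp [spassTake]
    | x :: y :: t =>
      simp only [spassTake]
      split_ifs <;> simp [List.drop_succ_cons, ih]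

theorem spassTake_max (m : Nat) (l : List String) (hm : m < l.length) :
    ∀ x ∈ l.take (m+1), cmKey x ≤ cmKey ((spassTake m l).getD m "") := by
  induction m generalizing l with
  | zero =>
    match l, hm with
    | z :: t, _ =>
      intro x hx
      simp only [List.take_succ_cons, List.take_zero, List.mem_singleton] at hx
      subst hx
      exact le_refl _
  | succ m ih =>
    match l, hm with
    | x :: y :: t, hm =>
      have ht : m < t.length + 1 := by simpa using Nat.lt_of_succ_lt_succ hm
      intro a ha
      simp only [List.take_succ_cons, List.mem_cons] at ha
      by_cases hc : cmKey y < cmKey x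
      · -- swap: carry x forward
        simp only [spassTake, if_pos hc, List.getD_cons_succ]
        have hx : cmKey x ≤ cmKey ((spassTake m (x :: t)).getD m "") :=
          ih (x :: t) (by simpa using ht) x (by simp)
        rcases ha with rfl | rfl | ha
        · exact hx
        · exact le_trans (le_of_lt hc) hx
        · exact ih (x :: t) (by simpa using ht) a
            (by simp only [List.take_succ_cons, List.mem_cons]; right; exact ha)
      · -- no swap: carry y forward
        simp only [spassTake, if_neg hc, List.getD_cons_succ]
        have hy : cmKey y ≤ cmKey ((spassTake m (y :: t)).getD m "") :=
          ih (y :: t) (by simpa using ht) y (by simp)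
        rcases ha with rfl | rfl | ha
        · exact le_trans (not_lt.mp hc) hy
        · exact hy
        · exact ih (y :: t) (by simpa using ht) a
            (by simp only [List.take_succ_cons, List.mem_cons]; right; exact ha)

theorem spassTake_filter (m : Nat) (l : List String) (k : Int) :
    (spassTake m l).filter (fun s => decide (cmKey s = k)) = l.filter (fun s => decide (cmKey s = k)) := by
  induction m generalizing l with
  | zero => rfl
  | succ m ih =>
    match l with
    | [] => rfl
    | [x] => rfl
    | x :: y :: t =>
      simp only [spassTake]
      split_ifs with hc
      · -- swapped: heads commute since their keys differ
        rw [List.filter_cons, ih (x :: t), List.filter_cons, List.filter_cons, List.filter_cons]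
        by_cases hx : cmKey x = k
        · have hy : ¬ cmKey y = k := fun h => absurd hc (by rw [h, hx]; exact lt_irrefl k)
          simp [hx, hy]
        · by_cases hy : cmKey y = k <;> simp [hx, hy]
      · simp only [List.filter_cons, ih (y :: t)]

-- ---- sortedness + stability invariant of the outer loop ----
def bubbleInv (lista : List String) (i : Nat) (l : List String) : Prop :=
  l.length = lista.length ∧
  (l.drop (lista.length - i)).Pairwise (fun a b => cmKey a ≤ cmKey b) ∧
  (∀ x ∈ l.take (lista.length - i), ∀ y ∈ l.drop (lista.length - i), cmKey x ≤ cmKey y) ∧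
  (∀ k : Int, l.filter (fun s => decide (cmKey s = k)) = lista.filter (fun s => decide (cmKey s = k)))

theorem bubbleInv_step (lista : List String) (i : Nat) (l : List String)
    (hi : i < lista.length) (h : bubbleInv lista i l) :
    bubbleInv lista (i+1) (spassTake (lista.length - i - 1) l) := by
  obtain ⟨hlen, hsorted, hcross, hfil⟩ := h
  set N := lista.length with hN
  set m := N - i - 1 with hm
  have hmN : m < N := by omega
  have hml : m < l.length := by omega
  have hm1 : m + 1 = N - i := by omega
  set l' := spassTake m l with hl'
  have hlen' : l'.length = N := by rw [hl', spassTake_length, hlen]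
  have hml' : m < l'.length := by omega
  have hdrop : l'.drop (m+1) = l.drop (N - i) := by
    rw [hl', spassTake_drop, ← hm1]
  -- the prefixes of length m+1 are permutations of each other
  have htake : (l'.take (m+1)).Perm (l.take (m+1)) := by
    have hp : (l'.take (m+1) ++ l'.drop (m+1)).Perm (l.take (m+1) ++ l.drop (m+1)) := by
      rw [List.take_append_drop, List.take_append_drop]
      exact spassTake_perm m l
    have hdeq : l'.drop (m+1) = l.drop (m+1) := by rw [hl', spassTake_drop]
    rw [hdeq] at hp
    exact (List.perm_append_right_iff _).mp hp
  -- the element parked at position m is ≥ every element of the prefix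
  have hmax : ∀ x ∈ l.take (m+1), cmKey x ≤ cmKey l'[m] := by
    intro x hx
    have := spassTake_max m l hml x hx
    rwa [← hl', List.getD_eq_getElem l' "" hml'] at this
  have hmem : l'[m] ∈ l.take (m+1) := by
    refine htake.mem_iff.mp ?_
    have hmt : m < (l'.take (m+1)).length := by
      rw [List.length_take]; omega
    have : (l'.take (m+1))[m] = l'[m] := List.getElem_take
    rw [← this]
    exact List.getElem_mem hmt
  have hdropm : l'.drop m = l'[m] :: l.drop (N - i) := by
    rw [List.drop_eq_getElem_cons hml', hdrop]
  have hsubset : l'.take m ⊆ l.take (m+1) := by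
    intro x hx
    have : l'.take m = (l'.take (m+1)).take m := by
      rw [List.take_take]; congr 1; omega
    rw [this] at hx
    exact htake.subset (List.take_subset m _ hx)
  refine ⟨hlen', ?_, ?_, ?_⟩
  · -- sortedness of the suffix
    have h1 : N - (i+1) = m := by omega
    rw [h1, hdropm]
    refine List.Pairwise.cons ?_ hsorted
    intro y hy
    exact hcross l'[m] (hm1 ▸ hmem) y hy
  · -- prefix ≤ suffix
    intro x hx y hy
    have h1 : N - (i+1) = m := by omega
    rw [h1] at hx hy
    rw [hdropm] at hy
    rcases List.mem_cons.mp hy with rfl | hy'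
    · exact hmax x (hsubset hx)
    · exact hcross x (hm1 ▸ (htake.subset (List.take_subset m _ (by
        have : l'.take m = (l'.take (m+1)).take m := by
          rw [List.take_take]; congr 1; omega
        rw [this] at hx; exact hx)))) y hy'
  · intro k
    rw [hl', spassTake_filter, hfil]

-- ---- stability of PySem's sorted ----
theorem filter_insertBy (x : String) (acc : List String) (k : Int)
    (hs : acc.Pairwise (fun a b => cmKey a ≤ cmKey b)) :
    (PySem.List.insertBy (fun a b => decide (cmKey a < cmKey b)) x acc).filter (fun s => decide (cmKey s = k))
      = if cmKey x = k then acc.filter (fun s => decide (cmKey s = k)) ++ [x]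
        else acc.filter (fun s => decide (cmKey s = k)) := by
  induction acc with
  | nil =>
    simp only [PySem.List.insertBy, List.filter_cons, List.filter_nil]
    by_cases hx : cmKey x = k <;> simp [hx]
  | cons y ys ih =>
    obtain ⟨hy, hys⟩ := List.pairwise_cons.mp hs
    by_cases hb : cmKey x < cmKey y
    · have he : PySem.List.insertBy (fun a b => decide (cmKey a < cmKey b)) x (y :: ys)
          = x :: y :: ys := by simp [PySem.List.insertBy, hb]
      rw [he]
      by_cases hx : cmKey x = k
      · have hyk : ¬ cmKey y = k := by
          intro h
          rw [hx, ← h] at hb  -- hb : cmKey x < cmKey y with cmKey x = k = cmKey y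
          exact lt_irrefl _ hb
        have hysk : ys.filter (fun s => decide (cmKey s = k)) = [] := by
          rw [List.filter_eq_nil_iff]
          intro z hz
          simp only [decide_eq_true_eq]
          intro hzk
          have hle := hy z hz
          rw [hzk, ← hx] at hle
          exact absurd hb (not_lt.mpr hle)
        simp [hx, hyk, hysk]
      · simp [List.filter_cons, hx]
    · have he : PySem.List.insertBy (fun a b => decide (cmKey a < cmKey b)) x (y :: ys)
          = y :: PySem.List.insertBy (fun a b => decide (cmKey a < cmKey b)) x ys := by
        simp [PySem.List.insertBy, hb]
      rw [he, List.filter_cons, ih hys, List.filter_cons]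
      by_cases hx : cmKey x = k <;> by_cases hyk : cmKey y = k <;> simp [hx, hyk]

theorem sorted_filter (xs : List String) (k : Int) :
    (PySem.List.sorted xs cmKey false).filter (fun s => decide (cmKey s = k))
      = xs.filter (fun s => decide (cmKey s = k)) := by
  induction xs using List.reverseRecOn with
  | nil => rfl
  | append_singleton xs x ih =>
    rw [PySem.List.sorted_eq_foldl_insertBy, List.foldl_append, List.foldl_cons, List.foldl_nil,
        ← PySem.List.sorted_eq_foldl_insertBy,
        filter_insertBy x _ k (PySem.List.sorted_pairwise xs cmKey), List.filter_append]
    split_ifs with hx <;> simp [hx, ih]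

-- a list whose head has the minimal key contains nothing with a strictly smaller key
theorem head_key_filter_nil (b : String) (t2 : List String)
    (hb2 : ∀ z ∈ t2, cmKey b ≤ cmKey z) (k : Int) (hk : k < cmKey b) :
    (b :: t2).filter (fun s => decide (cmKey s = k)) = [] := by
  rw [List.filter_eq_nil_iff]
  intro z hz
  simp only [decide_eq_true_eq]
  intro hzk
  have hbz : cmKey b ≤ cmKey z := by
    rcases List.mem_cons.mp hz with rfl | hz'
    · exact le_refl _
    · exact hb2 z hz'
  rw [hzk] at hbz
  exact absurd hk (not_lt.mpr hbz)

-- ---- uniqueness of a key-sorted, key-stable list ----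
theorem sorted_stable_unique : ∀ (l1 l2 : List String),
    l1.Pairwise (fun a b => cmKey a ≤ cmKey b) → l2.Pairwise (fun a b => cmKey a ≤ cmKey b) →
    (∀ k : Int, l1.filter (fun s => decide (cmKey s = k)) = l2.filter (fun s => decide (cmKey s = k))) →
    l1 = l2 := by
  intro l1
  induction l1 with
  | nil =>
    intro l2 _ _ hf
    cases l2 with
    | nil => rfl
    | cons b t2 =>
      have h := hf (cmKey b)
      rw [List.filter_nil, List.filter_cons] at h
      simp at h
  | cons a t1 ih =>
    intro l2 h1 h2 hf
    cases l2 with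
    | nil =>
      have h := hf (cmKey a)
      rw [List.filter_nil, List.filter_cons] at h
      simp at h
    | cons b t2 =>
      obtain ⟨ha1, ht1⟩ := List.pairwise_cons.mp h1
      obtain ⟨hb2, ht2⟩ := List.pairwise_cons.mp h2
      have hab : cmKey a = cmKey b := by
        rcases lt_trichotomy (cmKey a) (cmKey b) with hlt | heq | hgt
        · exfalso
          have h := hf (cmKey a)
          rw [head_key_filter_nil b t2 hb2 (cmKey a) hlt, List.filter_cons] at h
          simp at h
        · exact heq
        · exfalso
          have h := hf (cmKey b)
          rw [head_key_filter_nil a t1 ha1 (cmKey b) hgt, List.filter_cons] at h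
          simp at h
      have hk0 := hf (cmKey a)
      rw [List.filter_cons, List.filter_cons,
          if_pos (by simp : decide (cmKey a = cmKey a) = true),
          if_pos (by simp [hab] : decide (cmKey b = cmKey a) = true)] at hk0
      injection hk0 with hhead _
      subst hhead
      congr 1
      apply ih t2 ht1 ht2
      intro k
      have h := hf k
      rw [List.filter_cons, List.filter_cons] at h
      by_cases hk : decide (cmKey a = k) = true
      · rw [if_pos hk, if_pos hk] at h
        injection h
      · rwa [if_neg hk, if_neg hk] at h

-- ---- the outer loop establishes the invariant ----
theorem bubble_loop (lista : List String) :
    ∀ i, i ≤ lista.length →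
      bubbleInv lista i ((List.range i).foldl (fun l i' => ipass l (lista.length - i' - 1)) lista) := by
  intro i
  induction i with
  | zero =>
    intro _
    refine ⟨rfl, ?_, ?_, fun k => rfl⟩
    · rw [List.range_zero, List.foldl_nil, Nat.sub_zero, List.drop_length]
      exact List.Pairwise.nil
    · intro x _ y hy
      rw [List.range_zero, List.foldl_nil, Nat.sub_zero, List.drop_length] at hy
      simp at hy
  | succ i ih =>
    intro hi
    have hi' : i < lista.length := hi
    have hinv := ih (le_of_lt hi')
    rw [List.range_succ, List.foldl_append, List.foldl_cons, List.foldl_nil]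
    rw [ipass_eq_spassTake _ _ (by rw [hinv.1]; omega)]
    exact bubbleInv_step lista i _ hi' hinv

-- ---- port A computes the iterated restricted passes ----
theorem portA_inner (lista l : List String) (i : Nat) (hi : i < lista.length) :
    (PySem.List.pyRange 0 ((lista.length : Int) - ↑i - 1)).foldl
      (fun l j =>
        if contar_minusculas (PySem.List.pyGetD l j "") >
            contar_minusculas (PySem.List.pyGetD l (j + 1) "") then
          (l.set j.toNat (PySem.List.pyGetD l (j + 1) "")).set (j + 1).toNat
            (PySem.List.pyGetD l j "")
        else l) l
      = ipass l (lista.length - i - 1) := by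
  have hcast : ((lista.length : Int) - ↑i - 1) = ((lista.length - i - 1 : Nat) : Int) := by
    omega
  rw [hcast, PySem.List.pyRange_zero_natCast, List.foldl_map]
  unfold ipass
  refine PySem.List.foldl_congr_mem _ _ _ _ ?_
  intro acc j _
  have hc : ((j : Int) + 1) = ((j + 1 : Nat) : Int) := by push_cast; ring
  simp only [hc, PySem.List.pyGetD_natCast, Int.toNat_natCast, gt_iff_lt, pstep, cmKey]
  rfl

theorem portA_eq_fold (lista : List String) :
    ordenar_minusculas lista
      = (List.range lista.length).foldl (fun l i => ipass l (lista.length - i - 1)) lista := by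
  simp only [ordenar_minusculas]
  rw [PySem.List.pyRange_zero_natCast lista.length, List.foldl_map]
  refine PySem.List.foldl_congr_mem _ _ _ _ ?_
  intro l i hi
  rw [List.mem_range] at hi
  exact portA_inner lista l i hi

-- ===== VERDICT (by name: the statement is the Claim_ definition above) =====
theorem ordenar_minusculas_spec : Claim_equal_ordenar_minusculas := by
  unfold Claim_equal_ordenar_minusculas
  intro lista _
  unfold Spec_ordenar_minusculas ordenar_minusculas_alt
  have hkey : contar_minusculas_alt = cmKey := funext fun s => contar_alt_eq s
  rw [hkey, portA_eq_fold]
  obtain ⟨hlen, hsort, _, hfil⟩ := bubble_loop lista lista.length le_rfl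
  apply sorted_stable_unique
  · simpa using hsort
  · exact PySem.List.sorted_pairwise lista cmKey
  · intro k
    rw [hfil k]
    exact (sorted_filter lista k).symm
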